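-- pv_equiv track=rewrite | github.com/LestreZhao/agent-service | src/crawler/crawler.py | _extract_title_from_markdown
-- ===== SOURCE A (Python) =====
-- def _extract_title_from_markdown(markdown_content: str) -> str:
--     """从 Markdown 内容中提取标题"""
--     lines = markdown_content.split('\n')
--     for line in lines:
--         line = line.strip()
--         if line.startswith('# '):
--             return line[2:].strip()
--
--     # 如果没有找到 H1 标题，尝试找 H2
--     for line in lines:
--         line = line.strip()
--         if line.startswith('## '):
--             return line[3:].strip()
--
--     return "Untitled"
-- ===== SOURCE B (Python) =====
-- def _extract_title_from_markdown(markdown_content: str) -> str: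
--     """Single pass: return the first H1 immediately; remember the first H2 as a fallback."""
--     h2 = None
--     for line in markdown_content.split('\n'):
--         line = line.strip()
--         if line.startswith('# '):
--             return line[2:].strip()
--         if h2 is None and line.startswith('## '):
--             h2 = line[3:].strip()
--     return h2 if h2 is not None else "Untitled"
-- ===== Notes on version B (the rewrite author's own statement) =====
-- stated objective: alternative
-- what changed: Replaces A's two sequential scans (first for '# ', then for '## ') with a single pass that returns on the first H1 and tracks the first H2 in an accumulator used only after the loop.
import Mathlib
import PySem

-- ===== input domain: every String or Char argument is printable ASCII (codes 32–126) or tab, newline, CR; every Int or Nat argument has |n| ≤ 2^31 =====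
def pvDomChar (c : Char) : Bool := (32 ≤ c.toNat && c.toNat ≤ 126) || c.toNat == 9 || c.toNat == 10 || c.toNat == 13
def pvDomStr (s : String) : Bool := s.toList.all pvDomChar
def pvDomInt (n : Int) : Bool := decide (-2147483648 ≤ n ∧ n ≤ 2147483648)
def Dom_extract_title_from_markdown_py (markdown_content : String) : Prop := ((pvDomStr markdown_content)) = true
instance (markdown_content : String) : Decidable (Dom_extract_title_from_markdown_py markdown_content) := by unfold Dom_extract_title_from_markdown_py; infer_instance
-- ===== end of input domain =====

-- B merges A's two sequential scans into one pass with an H2 accumulator (objective: alternative decomposition).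

-- ===== PORT A =====
-- first loop of A: return stripped line[2:] of the first stripped line starting with '# '
def pvFindH1 : List (List Char) → Option (List Char)
  | [] => none
  | l :: rest =>
    let s := PySem.Chars.strip l
    if PySem.Chars.startswith s ['#', ' '] then
      some (PySem.Chars.strip (PySem.Chars.slice s (some 2) none))
    else pvFindH1 rest

-- second loop of A: same for '## ' and line[3:]
def pvFindH2 : List (List Char) → Option (List Char)
  | [] => none
  | l :: rest =>
    let s := PySem.Chars.strip l
    if PySem.Chars.startswith s ['#', '#', ' '] then
      some (PySem.Chars.strip (PySem.Chars.slice s (some 3) none))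
    else pvFindH2 rest

def extract_title_from_markdown_py (markdown_content : String) : String :=
  let lines := PySem.Chars.splitOn markdown_content.toList ['\n']
  match pvFindH1 lines with
  | some t => String.ofList t
  | none =>
    match pvFindH2 lines with
    | some t => String.ofList t
    | none => "Untitled"

-- ===== PORT B =====
-- B's single loop: early return on H1, accumulate the first H2 in h2
def pvScan : List (List Char) → Option (List Char) → String
  | [], h2 => match h2 with | some v => String.ofList v | none => "Untitled"
  | l :: rest, h2 =>
    let s := PySem.Chars.strip l
    if PySem.Chars.startswith s ['#', ' '] then
      String.ofList (PySem.Chars.strip (PySem.Chars.slice s (some 2) none))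
    else if h2.isNone && PySem.Chars.startswith s ['#', '#', ' '] then
      pvScan rest (some (PySem.Chars.strip (PySem.Chars.slice s (some 3) none)))
    else pvScan rest h2

def extract_title_from_markdown_py_alt (markdown_content : String) : String :=
  pvScan (PySem.Chars.splitOn markdown_content.toList ['\n']) none

-- ===== PRECONDITION & SPEC =====
def Spec_extract_title_from_markdown_py (markdown_content : String) (out : String) : Prop := out = extract_title_from_markdown_py_alt markdown_content
instance (markdown_content : String) (out : String) : Decidable (Spec_extract_title_from_markdown_py markdown_content out) := by unfold Spec_extract_title_from_markdown_py; infer_instance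

-- ===== CLAIM (what is proved, stated in full; the proofs are below) =====
def Claim_equal_extract_title_from_markdown_py : Prop := ∀ (markdown_content : String), Dom_extract_title_from_markdown_py markdown_content → Spec_extract_title_from_markdown_py markdown_content (extract_title_from_markdown_py markdown_content)

-- ===== LEMMAS AND PROOFS =====
-- loop invariant of B's single pass, expressed through A's two scans
theorem pvScan_eq (lines : List (List Char)) (h2 : Option (List Char)) :
    pvScan lines h2 =
      match pvFindH1 lines with
      | some t => String.ofList t
      | none =>
        match h2 with
        | some v => String.ofList v
        | none =>
          match pvFindH2 lines with
          | some t => String.ofList t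
          | none => "Untitled" := by
  induction lines generalizing h2 with
  | nil => cases h2 <;> rfl
  | cons l rest ih =>
    simp only [pvScan, pvFindH1, pvFindH2]
    by_cases h1 : PySem.Chars.startswith (PySem.Chars.strip l) ['#', ' '] = true
    · simp [h1]
    · cases h2 with
      | some v => simp [h1, ih]
      | none =>
        by_cases hh : PySem.Chars.startswith (PySem.Chars.strip l) ['#', '#', ' '] = true
        · simp [h1, hh, ih]
        · simp [h1, hh, ih]

-- ===== VERDICT (by name: the statement is the Claim_ definition above) =====
theorem extract_title_from_markdown_py_spec : Claim_equal_extract_title_from_markdown_py := by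
  intro s _
  show _ = _
  rw [extract_title_from_markdown_py_alt, pvScan_eq, extract_title_from_markdown_py]
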